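-- pv_equiv track=rewrite | github.com/adkinsrs/AdventOfCode2015 | 12_11.py | straight_sequence_present
-- ===== SOURCE A (Python) =====
-- letter_order = 'abcdefghjkmnpqrstuvwxyz'
--
-- def straight_sequence_present(string):
-- 	for i in range(len(string)):
-- 		try:
-- 			trio = ''.join([string[i], string[i+1], string[i+2]])
-- 			if trio in letter_order:
-- 				return True
-- 		except IndexError:
-- 			continue
-- 	return False
-- ===== SOURCE B (Python) =====
-- letter_order = 'abcdefghjkmnpqrstuvwxyz'
--
-- _VALID_TRIOS = [letter_order[i:i+3] for i in range(len(letter_order) - 2)]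
--
-- def straight_sequence_present(string):
-- 	return any(trio in string for trio in _VALID_TRIOS)
-- ===== Notes on version B (the rewrite author's own statement) =====
-- stated objective: faster
-- what changed: Instead of sliding a 3-char window over the input with Python-level indexing and testing each window for membership in letter_order, B precomputes the 21 valid straights once and tests each as a substring of the whole input, reversing which side is iterated.
import Mathlib
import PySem

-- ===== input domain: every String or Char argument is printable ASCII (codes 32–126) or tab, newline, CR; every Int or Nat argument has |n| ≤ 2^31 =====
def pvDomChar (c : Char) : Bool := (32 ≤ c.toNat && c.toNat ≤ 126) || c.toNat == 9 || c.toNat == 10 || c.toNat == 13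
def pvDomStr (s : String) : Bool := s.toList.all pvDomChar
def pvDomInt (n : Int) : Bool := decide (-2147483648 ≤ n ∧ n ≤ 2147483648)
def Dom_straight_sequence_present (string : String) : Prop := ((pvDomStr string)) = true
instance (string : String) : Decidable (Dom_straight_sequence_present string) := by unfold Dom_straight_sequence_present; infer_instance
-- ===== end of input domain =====

-- B precomputes the 21 valid three-letter straights and tests each as a substring of the
-- input, instead of sliding a window over the input and testing membership in letter_order.


-- ===== PORT A =====
def letter_order : String := "abcdefghjkmnpqrstuvwxyz"

-- the loop body: read string[i], string[i+1], string[i+2] (IndexError → continue = false),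
-- ''.join of the three one-char strings is String.mk [a, b, c], then test 'trio in letter_order'
def pvCheckAt (s : String) (i : Int) : Bool :=
  match PySem.Str.pyGet? s i, PySem.Str.pyGet? s (i + 1), PySem.Str.pyGet? s (i + 2) with
  | some a, some b, some c => PySem.Str.isIn (String.ofList [a, b, c]) letter_order
  | _, _, _ => false

def pvALoop (s : String) : List Int → Bool
  | [] => false
  | i :: rest => if pvCheckAt s i then true else pvALoop s rest

def straight_sequence_present (string : String) : Bool :=
  pvALoop string (PySem.List.pyRange 0 (PySem.Str.len string) 1)

-- ===== PORT B =====
-- [letter_order[i:i+3] for i in range(len(letter_order) - 2)]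
def pvValidTrios : List String :=
  (PySem.List.pyRange 0 (PySem.Str.len letter_order - 2) 1).map
    (fun i => PySem.Str.slice letter_order (some i) (some (i + 3)))

def straight_sequence_present_alt (string : String) : Bool :=
  pvValidTrios.any (fun trio => PySem.Str.isIn trio string)

-- ===== PRECONDITION & SPEC =====
def Spec_straight_sequence_present (string : String) (out : Bool) : Prop := out = straight_sequence_present_alt string
instance (string : String) (out : Bool) : Decidable (Spec_straight_sequence_present string out) := by unfold Spec_straight_sequence_present; infer_instance

-- ===== CLAIM (what is proved, stated in full; the proofs are below) =====
def Claim_equal_straight_sequence_present : Prop := ∀ (string : String), Dom_straight_sequence_present string → Spec_straight_sequence_present string (straight_sequence_present string)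

-- ===== LEMMAS AND PROOFS =====

lemma pvALoop_eq_any (s : String) (l : List Int) : pvALoop s l = l.any (pvCheckAt s) := by
  induction l with
  | nil => rfl
  | cons i rest ih => by_cases h : pvCheckAt s i = true <;> simp [pvALoop, h, ih]

lemma pvTake3_iff (l : List Char) (a b c : Char) :
    (l[0]? = some a ∧ l[1]? = some b ∧ l[2]? = some c) ↔ [a, b, c] <+: l := by
  constructor
  · rintro ⟨ha, hb, hc⟩
    rcases l with _ | ⟨x, _ | ⟨y, _ | ⟨z, t⟩⟩⟩ <;> simp_all [List.cons_prefix_cons]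
  · rintro ⟨t, rfl⟩
    simp

lemma pvPrefix3_eq_take (l w : List Char) (h : w.length = 3) (hp : w <+: l) :
    w = l.take 3 := by
  have := List.prefix_iff_eq_take.mp hp
  rw [h] at this; exact this

-- characterisation of A: some window [a,b,c] of the input is an infix of letter_order
lemma pvA_iff (s : String) :
    straight_sequence_present s = true ↔
      ∃ i : Nat, ∃ a b c : Char,
        s.toList[i]? = some a ∧ s.toList[i+1]? = some b ∧ s.toList[i+2]? = some c ∧
        PySem.Chars.isIn [a, b, c] letter_order.toList = true := by
  unfold straight_sequence_present
  rw [pvALoop_eq_any, List.any_eq_true]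
  constructor
  · rintro ⟨i, hmem, hchk⟩
    rw [PySem.List.mem_pyRange_one] at hmem
    obtain ⟨h0, _⟩ := hmem
    unfold pvCheckAt at hchk
    rcases ha : PySem.Str.pyGet? s i with _ | a <;> rw [ha] at hchk
    · simp at hchk
    rcases hb : PySem.Str.pyGet? s (i+1) with _ | b <;> rw [hb] at hchk
    · simp at hchk
    rcases hc : PySem.Str.pyGet? s (i+2) with _ | c <;> rw [hc] at hchk
    · simp at hchk
    refine ⟨i.toNat, a, b, c, ?_, ?_, ?_, ?_⟩
    · rw [← PySem.Str.pyGet?_natCast, Int.toNat_of_nonneg h0]; exact ha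
    · rw [← PySem.Str.pyGet?_natCast]; push_cast [Int.toNat_of_nonneg h0]; exact hb
    · rw [← PySem.Str.pyGet?_natCast]; push_cast [Int.toNat_of_nonneg h0]; exact hc
    · simpa using hchk
  · rintro ⟨i, a, b, c, ha, hb, hc, hin⟩
    have hlen : i < s.toList.length := (List.getElem?_eq_some_iff.mp ha).1
    refine ⟨(i : Int), ?_, ?_⟩
    · rw [PySem.List.mem_pyRange_one]
      constructor
      · exact Int.ofNat_nonneg i
      · simpa [PySem.Str.len] using Int.ofNat_lt.mpr hlen
    · unfold pvCheckAt
      have ha' : PySem.Str.pyGet? s (i : Int) = some a := by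
        rw [PySem.Str.pyGet?_natCast]; exact ha
      have hb' : PySem.Str.pyGet? s ((i : Int) + 1) = some b := by
        have : ((i : Int) + 1) = ((i + 1 : Nat) : Int) := by push_cast; ring
        rw [this, PySem.Str.pyGet?_natCast]; exact hb
      have hc' : PySem.Str.pyGet? s ((i : Int) + 2) = some c := by
        have : ((i : Int) + 2) = ((i + 2 : Nat) : Int) := by push_cast; ring
        rw [this, PySem.Str.pyGet?_natCast]; exact hc
      rw [ha', hb', hc']
      simpa using hin

lemma pvSliceTrio (k : Nat) :
    (PySem.Str.slice letter_order (some (k : Int)) (some ((k : Int) + 3))).toList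
      = (letter_order.toList.drop k).take 3 := by
  rw [PySem.Str.toList_slice, PySem.Chars.slice_eq_listSlice]
  have h3 : ((k : Int) + 3) = ((k : Int) + ((3 : Nat) : Int)) := by norm_num
  rw [h3, PySem.List.slice_natCast_add]

-- characterisation of B: some of the 21 trios of letter_order is an infix of the input
lemma pvB_iff (s : String) :
    straight_sequence_present_alt s = true ↔
      ∃ j : Nat, j < 21 ∧
        PySem.Chars.isIn ((letter_order.toList.drop j).take 3) s.toList = true := by
  unfold straight_sequence_present_alt pvValidTrios
  rw [List.any_eq_true]
  have hlen : PySem.Str.len letter_order - 2 = (21 : Int) := by decide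
  rw [hlen]
  constructor
  · rintro ⟨t, ht, hin⟩
    rw [List.mem_map] at ht
    obtain ⟨j, hj, rfl⟩ := ht
    rw [PySem.List.mem_pyRange_one] at hj
    obtain ⟨h0, h21⟩ := hj
    refine ⟨j.toNat, ?_, ?_⟩
    · omega
    · obtain ⟨k, rfl⟩ : ∃ k : Nat, j = (k : Int) := ⟨j.toNat, by omega⟩
      rw [PySem.Str.isIn_eq, pvSliceTrio] at hin
      simpa using hin
  · rintro ⟨j, hj, hin⟩
    refine ⟨PySem.Str.slice letter_order (some (j : Int)) (some ((j : Int) + 3)), ?_, ?_⟩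
    · rw [List.mem_map]
      refine ⟨(j : Int), ?_, rfl⟩
      rw [PySem.List.mem_pyRange_one]
      constructor
      · exact Int.ofNat_nonneg j
      · exact_mod_cast hj
    · rw [PySem.Str.isIn_eq, pvSliceTrio]
      exact hin

-- the bridge between the two characterisations
lemma pvMain (s : String) :
    straight_sequence_present s = straight_sequence_present_alt s := by
  rcases hB : straight_sequence_present_alt s with _ | _
  · -- B = false: show A = false, i.e. A ≠ true
    rw [Bool.eq_false_iff]
    intro hA
    rw [pvA_iff] at hA
    obtain ⟨i, a, b, c, ha, hb, hc, hin⟩ := hA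
    -- [a,b,c] is a prefix of letter_order.drop j for some j, and of s.drop i
    rw [← PySem.Chars.exists_prefix_drop_iff_isIn] at hin
    obtain ⟨j, hjpre⟩ := hin
    have hLOlen : letter_order.toList.length = 23 := by decide
    have hjlen : j + 3 ≤ letter_order.toList.length := by
      have := hjpre.length_le
      simp [hLOlen] at this ⊢
      omega
    have htrio : [a, b, c] = (letter_order.toList.drop j).take 3 := by
      apply pvPrefix3_eq_take _ _ (by simp) hjpre
    have hspre : [a, b, c] <+: s.toList.drop i := by
      rw [← pvTake3_iff]
      simp only [List.getElem?_drop]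
      exact ⟨ha, hb, hc⟩
    have hBtrue : straight_sequence_present_alt s = true := by
      rw [pvB_iff]
      refine ⟨j, by omega, ?_⟩
      rw [← PySem.Chars.exists_prefix_drop_iff_isIn]
      exact ⟨i, htrio ▸ hspre⟩
    rw [hB] at hBtrue; exact absurd hBtrue (by simp)
  · -- B = true: show A = true
    rw [pvB_iff] at hB
    obtain ⟨j, hj, hin⟩ := hB
    rw [← PySem.Chars.exists_prefix_drop_iff_isIn] at hin
    obtain ⟨i, hipre⟩ := hin
    have hLOlen : letter_order.toList.length = 23 := by decide
    have hlen3 : ((letter_order.toList.drop j).take 3).length = 3 := by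
      rw [List.length_take, List.length_drop, hLOlen]; omega
    obtain ⟨a, b, c, habc⟩ := List.length_eq_three.mp hlen3
    rw [pvA_iff]
    rw [habc] at hipre
    have := (pvTake3_iff (s.toList.drop i) a b c).mpr hipre
    simp only [List.getElem?_drop] at this
    refine ⟨i, a, b, c, this.1, this.2.1, this.2.2, ?_⟩
    rw [← PySem.Chars.exists_prefix_drop_iff_isIn]
    exact ⟨j, habc ▸ List.take_prefix 3 _⟩

-- ===== VERDICT (by name: the statement is the Claim_ definition above) =====
theorem straight_sequence_present_spec : Claim_equal_straight_sequence_present := by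
  intro s _
  unfold Spec_straight_sequence_present
  exact pvMain s
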